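-- pv_equiv track=rewrite | github.com/in-manish/graduating-solution | solution.py | filter_out_absent
-- ===== SOURCE A (Python) =====
-- def filter_out_absent(combinations):
--     """
--         filter out consecutive four days absent
--     """
--     to_remove_combinations = []
--     for combination in combinations:
--         splits = combination.split('P')
--         for val in splits:
--             if val.count('A') >= 4:
--                 to_remove_combinations.append(combination)
--                 break
--     for combination in to_remove_combinations:
--         combinations.remove(combination)
--     return combinations
-- ===== SOURCE B (Python) =====
-- def filter_out_absent(combinations):
--     """
--         filter out consecutive four days absent
--     """
--     kept = []
--     for combination in combinations:
--         run = 0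
--         bad = False
--         for ch in combination:
--             if ch == 'P':
--                 run = 0
--             elif ch == 'A':
--                 run += 1
--                 if run >= 4:
--                     bad = True
--                     break
--         if not bad:
--             kept.append(combination)
--     combinations[:] = kept
--     return combinations
-- ===== Notes on version B (the rewrite author's own statement) =====
-- stated objective: simpler
-- what changed: Replaces the two-pass predicate (split each string on 'P', then count 'A' in every segment) and the collect-then-list.remove loop with a single streaming character scan per string (an 'A'-counter reset on 'P', flagged once it reaches 4) and one in-place slice assignment of the kept strings.
import Mathlib
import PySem

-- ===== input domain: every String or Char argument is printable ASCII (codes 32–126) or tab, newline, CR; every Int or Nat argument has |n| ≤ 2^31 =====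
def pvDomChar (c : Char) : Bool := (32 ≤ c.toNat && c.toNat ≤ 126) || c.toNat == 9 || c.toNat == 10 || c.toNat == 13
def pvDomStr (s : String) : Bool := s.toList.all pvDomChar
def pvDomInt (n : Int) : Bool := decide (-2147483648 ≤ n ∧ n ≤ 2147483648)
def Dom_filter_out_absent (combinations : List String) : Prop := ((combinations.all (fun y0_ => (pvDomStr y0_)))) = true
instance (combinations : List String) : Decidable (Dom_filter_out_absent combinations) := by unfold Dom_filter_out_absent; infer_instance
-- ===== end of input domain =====

-- B replaces A's split-then-count-per-segment predicate and quadratic remove loop by one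
-- streaming scan per string (an 'A'-counter reset on 'P') and a single filter; A mutates the
-- input list in place (remove / slice assignment) — the equivalence proved is about the return value.

-- ===== PORT A =====
def filter_out_absent (combinations : List String) : List String :=
  -- first loop: 'for val in combination.split("P"): if val.count("A") >= 4: append; break'
  -- (the break means the combination is appended once iff SOME split piece has ≥ 4 'A's)
  (combinations.foldl
    (fun acc combination =>
      if ((PySem.Str.split? combination "P").getD []).any
           (fun val => decide (4 ≤ PySem.Str.count val "A"))
      then acc ++ [combination] else acc) []).foldl
    -- second loop: combinations.remove(c); c was collected from the list once per occurrence,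
    -- so list.remove never raises here (getD is never taken on none)
    (fun lst combination => (PySem.List.remove? lst combination).getD lst) combinations

-- ===== PORT B =====
-- B-side helper: the inner character loop of Source B (counter resets on 'P', bad at 4 'A's)
def pvBadRun : List Char → Nat → Bool
  | [], _ => false
  | c :: rest, run =>
    if c = 'P' then pvBadRun rest 0
    else if c = 'A' then
      if 4 ≤ run + 1 then true else pvBadRun rest (run + 1)
    else pvBadRun rest run

def filter_out_absent_alt (combinations : List String) : List String :=
  combinations.filter (fun combination => !pvBadRun combination.toList 0)

-- ===== PRECONDITION & SPEC =====
def Spec_filter_out_absent (combinations : List String) (out : List String) : Prop := out = filter_out_absent_alt combinations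
instance (combinations : List String) (out : List String) : Decidable (Spec_filter_out_absent combinations out) := by unfold Spec_filter_out_absent; infer_instance

-- ===== CLAIM (what is proved, stated in full; the proofs are below) =====
def Claim_equal_filter_out_absent : Prop := ∀ (combinations : List String), Dom_filter_out_absent combinations → Spec_filter_out_absent combinations (filter_out_absent combinations)

-- ===== LEMMAS AND PROOFS =====

-- the list of 'P'-separated segments of a string, with `pre` the part of the current segment read so far
def pvSegs : List Char → List Char → List (List Char)
  | pre, [] => [pre]
  | pre, c :: rest => if c = 'P' then pre :: pvSegs [] rest else pvSegs (pre ++ [c]) rest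

-- counting the single character 'A' is List.count
lemma pvCountGo_A : ∀ (fuel : ℕ) (v : List Char) (acc : ℕ), v.length ≤ fuel →
    PySem.Chars.count.go ['A'] fuel v acc = acc + v.count 'A' := by
  intro fuel
  induction fuel with
  | zero =>
    intro v acc h
    have hv : v = [] := by cases v <;> simp_all
    subst hv
    simp [PySem.Chars.count.go]
  | succ n ih =>
    intro v acc h
    cases v with
    | nil => simp [PySem.Chars.count.go]
    | cons c rest =>
      show (if ['A'].isPrefixOf (c :: rest) then
              PySem.Chars.count.go ['A'] n (List.drop (['A'].length) (c :: rest)) (acc + 1)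
            else PySem.Chars.count.go ['A'] n rest acc) = acc + (c :: rest).count 'A'
      by_cases hc : c = 'A'
      · subst hc
        rw [if_pos (by simp [List.isPrefixOf])]
        simp only [List.length_singleton, List.drop_succ_cons, List.drop_zero]
        rw [ih rest (acc + 1) (by simpa using h)]
        simp [List.count_cons]
        omega
      · rw [if_neg (by simp [List.isPrefixOf]; exact fun h' => hc h'.symm)]
        rw [ih rest acc (by simpa using h)]
        simp [List.count_cons, hc]

lemma pvCount_A (v : List Char) : PySem.Chars.count v ['A'] = v.count 'A' := by
  show (if (['A'] : List Char).isEmpty then v.length + 1 else PySem.Chars.count.go ['A'] v.length v 0) = v.count 'A'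
  rw [if_neg (by simp)]
  simpa using pvCountGo_A v.length v 0 le_rfl

-- splitting on the single character 'P' is pvSegs
lemma pvSplitGo_P : ∀ (fuel : ℕ) (l cur : List Char) (acc : List (List Char)), l.length ≤ fuel →
    PySem.Chars.splitOn.go ['P'] fuel l cur acc = acc.reverse ++ pvSegs cur.reverse l := by
  intro fuel
  induction fuel with
  | zero =>
    intro l cur acc h
    have hl : l = [] := by cases l <;> simp_all
    subst hl
    show ((cur.reverse ++ []) :: acc).reverse = acc.reverse ++ pvSegs cur.reverse []
    simp [pvSegs]
  | succ n ih =>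
    intro l cur acc h
    cases l with
    | nil =>
      show (cur.reverse :: acc).reverse = acc.reverse ++ pvSegs cur.reverse []
      simp [pvSegs]
    | cons c rest =>
      show (if ['P'].isPrefixOf (c :: rest) then
              PySem.Chars.splitOn.go ['P'] n (List.drop (['P'].length) (c :: rest)) [] (cur.reverse :: acc)
            else PySem.Chars.splitOn.go ['P'] n rest (c :: cur) acc)
           = acc.reverse ++ pvSegs cur.reverse (c :: rest)
      by_cases hc : c = 'P'
      · subst hc
        rw [if_pos (by simp [List.isPrefixOf])]
        simp only [List.length_singleton, List.drop_succ_cons, List.drop_zero]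
        rw [ih rest [] (cur.reverse :: acc) (by simpa using h)]
        simp [pvSegs]
      · rw [if_neg (by simp [List.isPrefixOf]; exact fun h' => hc h'.symm)]
        rw [ih rest (c :: cur) acc (by simpa using h)]
        simp [pvSegs, hc]

lemma pvSplitOn_P (cs : List Char) : PySem.Chars.splitOn cs ['P'] = pvSegs [] cs := by
  show PySem.Chars.splitOn.go ['P'] (cs.length + 1) cs [] [] = pvSegs [] cs
  simpa using pvSplitGo_P (cs.length + 1) cs [] [] (by omega)

-- once the running segment already holds 4 'A's, some segment of the result does
lemma pvSegs_any_of_ge : ∀ (cs pre : List Char), 4 ≤ pre.count 'A' →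
    (pvSegs pre cs).any (fun v => decide (4 ≤ v.count 'A')) = true := by
  intro cs
  induction cs with
  | nil => intro pre h; simp [pvSegs, h]
  | cons c rest ih =>
    intro pre h
    by_cases hc : c = 'P'
    · subst hc; simp [pvSegs, h]
    · simp only [pvSegs, if_neg hc]
      exact ih (pre ++ [c]) (by simp [List.count_append]; omega)

-- the streaming counter computes the segment-wise predicate
lemma pvBadRun_segs : ∀ (cs pre : List Char), pre.count 'A' < 4 →
    pvBadRun cs (pre.count 'A') = (pvSegs pre cs).any (fun v => decide (4 ≤ v.count 'A')) := by
  intro cs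
  induction cs with
  | nil =>
    intro pre h
    simp [pvBadRun, pvSegs]
    omega
  | cons c rest ih =>
    intro pre h
    by_cases hc : c = 'P'
    · subst hc
      simp only [pvBadRun, pvSegs, if_pos rfl]
      have := ih [] (by simp)
      simp only [List.count_nil] at this
      rw [this]
      simp [show ¬ (4 ≤ pre.count 'A') from by omega]
    · by_cases hA : c = 'A'
      · subst hA
        have hPA : ('A' : Char) ≠ 'P' := by decide
        simp only [pvBadRun, pvSegs, if_neg hPA, if_pos rfl, if_neg hc]
        by_cases h4 : 4 ≤ pre.count 'A' + 1
        · rw [if_pos h4]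
          exact (pvSegs_any_of_ge rest (pre ++ ['A']) (by simp [List.count_append]; omega)).symm
        · rw [if_neg h4]
          have := ih (pre ++ ['A']) (by simp [List.count_append]; omega)
          simpa [List.count_append] using this
      · simp only [pvBadRun, pvSegs, if_neg hc, if_neg hA]
        have := ih (pre ++ [c]) (by simp [List.count_append, hA]; omega)
        simpa [List.count_append, hA] using this

-- A's removal predicate equals B's streaming predicate
lemma pvBadA_eq (s : String) :
    ((PySem.Str.split? s "P").getD []).any (fun val => decide (4 ≤ PySem.Str.count val "A"))
      = pvBadRun s.toList 0 := by
  have hsplit : PySem.Str.split? s "P"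
      = some ((PySem.Chars.splitOn s.toList ['P']).map String.ofList) := by
    simp [PySem.Str.split?, PySem.Chars.split?]
  rw [hsplit, Option.getD_some, List.any_map, pvSplitOn_P]
  have hfun : ∀ v : List Char,
      ((fun val => decide (4 ≤ PySem.Str.count val "A")) ∘ String.ofList) v
        = (fun v : List Char => decide (4 ≤ v.count 'A')) v := by
    intro v
    simp [Function.comp, PySem.Str.count_eq, pvCount_A]
  rw [show ((fun val => decide (4 ≤ PySem.Str.count val "A")) ∘ String.ofList)
      = (fun v : List Char => decide (4 ≤ v.count 'A')) from funext hfun]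
  have := pvBadRun_segs s.toList [] (by simp)
  simpa using this.symm

-- folding list.remove over elements all different from the head leaves the head in place
lemma pvFoldRemove_cons (rs : List String) (a : String) :
    ∀ l : List String, (∀ x ∈ rs, x ≠ a) →
      rs.foldl (fun lst c => (PySem.List.remove? lst c).getD lst) (a :: l)
        = a :: rs.foldl (fun lst c => (PySem.List.remove? lst c).getD lst) l := by
  induction rs with
  | nil => intro l _; rfl
  | cons r rs ih =>
    intro l hr
    have hra : a ≠ r := fun h => (hr r (by simp)) h.symm
    simp only [List.foldl_cons]
    rw [PySem.List.remove?_cons_of_ne l hra]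
    have hstep : (Option.map (fun t => a :: t) (PySem.List.remove? l r)).getD (a :: l)
        = a :: (PySem.List.remove? l r).getD l := by
      cases PySem.List.remove? l r <;> rfl
    rw [hstep]
    exact ih _ (fun x hx => hr x (by simp [hx]))

-- removing every collected occurrence is filtering with the negated predicate
lemma pvFoldRemove_filter (q : String → Bool) :
    ∀ l : List String,
      (l.filter q).foldl (fun lst c => (PySem.List.remove? lst c).getD lst) l
        = l.filter (fun x => !q x) := by
  intro l
  induction l with
  | nil => rfl
  | cons a l ih =>
    by_cases hq : q a
    · rw [List.filter_cons_of_pos hq]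
      simp only [List.foldl_cons, PySem.List.remove?_cons_self, Option.getD_some]
      rw [ih, List.filter_cons_of_neg (by simp [hq])]
    · rw [List.filter_cons_of_neg (by simp [hq])]
      rw [pvFoldRemove_cons (l.filter q) a l
        (fun x hx => fun hxa => hq (by rw [← hxa]; exact (List.of_mem_filter hx)))]
      rw [ih, List.filter_cons_of_pos (by simp [hq])]

-- ===== VERDICT (by name: the statement is the Claim_ definition above) =====
theorem filter_out_absent_spec : Claim_equal_filter_out_absent := by
  intro combinations _
  unfold Spec_filter_out_absent filter_out_absent filter_out_absent_alt
  rw [show (fun acc combination =>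
        if ((PySem.Str.split? combination "P").getD []).any
             (fun val => decide (4 ≤ PySem.Str.count val "A"))
        then acc ++ [combination] else acc)
      = (fun (acc : List String) combination =>
        if (fun s => ((PySem.Str.split? s "P").getD []).any
             (fun val => decide (4 ≤ PySem.Str.count val "A"))) combination = true
        then acc ++ [id combination] else acc) from rfl]
  rw [PySem.List.foldl_append_if _ id combinations []]
  simp only [List.map_id, List.nil_append]
  rw [pvFoldRemove_filter _ combinations]
  exact List.filter_congr (fun x _ => by rw [pvBadA_eq x])
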